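-- pv_equiv track=rewrite | github.com/pohmelie/spoj | BEADS.py | mins
-- ===== SOURCE A (Python) =====
-- def mins(s, inds, shift):
--     ret = (inds[0],)
--     for i in range(1, len(inds)):
--         a, b = s[ret[0] + shift], s[inds[i] + shift]
--         if a > b:
--             ret = (inds[i],)
--         elif a == b:
--             ret += (inds[i],)
--     return ret
-- ===== SOURCE B (Python) =====
-- def mins(s, inds, shift):
--     # pass 1: find the minimum shifted character (anchored on inds[0])
--     m = s[inds[0] + shift]
--     for i in inds:
--         c = s[i + shift]
--         if c < m:
--             m = c
--     # pass 2: collect, in order, every index achieving it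
--     return tuple(i for i in inds if s[i + shift] == m)
-- ===== Notes on version B (the rewrite author's own statement) =====
-- stated objective: simpler
-- what changed: A's single fused running-min scan that rebuilds/extends the result tuple as it goes is split into two plain passes: first find the minimum shifted character, then filter the indices that achieve it.
-- outside the precondition, e.g. on mins('ab', (5,), 0): A returns (5,), B raises IndexError
import Mathlib
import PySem

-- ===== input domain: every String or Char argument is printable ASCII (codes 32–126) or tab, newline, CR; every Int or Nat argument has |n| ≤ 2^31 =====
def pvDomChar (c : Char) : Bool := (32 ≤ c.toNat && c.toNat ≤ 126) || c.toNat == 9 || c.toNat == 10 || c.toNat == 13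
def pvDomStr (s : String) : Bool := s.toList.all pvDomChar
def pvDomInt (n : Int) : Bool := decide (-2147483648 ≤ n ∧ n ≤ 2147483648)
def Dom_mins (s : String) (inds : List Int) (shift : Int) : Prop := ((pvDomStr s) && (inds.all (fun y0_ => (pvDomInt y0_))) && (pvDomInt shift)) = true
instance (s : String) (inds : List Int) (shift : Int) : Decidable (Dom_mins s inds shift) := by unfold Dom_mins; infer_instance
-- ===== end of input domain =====

-- B splits A's fused running-min scan into two plain passes (find the minimum, then filter); simpler, same cost.

-- shared shorthand for the subexpression s[i + shift] (none = IndexError; default never reached inside Pre_)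
def pvF (s : String) (shift : Int) (i : Int) : Char := (PySem.Str.pyGet? s (i + shift)).getD ' '

-- ===== PORT A =====
def mins (s : String) (inds : List Int) (shift : Int) : List Int :=
  let ret0 : List Int := [(PySem.List.pyGet? inds 0).getD 0]
  (PySem.List.pyRange 1 (inds.length : Int) 1).foldl
    (fun ret i =>
      let a := pvF s shift (ret.headD 0)
      let b := pvF s shift (PySem.List.pyGetD inds i 0)
      if a > b then [PySem.List.pyGetD inds i 0]
      else if a = b then ret ++ [PySem.List.pyGetD inds i 0]
      else ret)
    ret0

-- ===== PORT B =====
def mins_alt (s : String) (inds : List Int) (shift : Int) : List Int :=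
  let m0 := pvF s shift ((PySem.List.pyGet? inds 0).getD 0)
  let m := inds.foldl (fun m i => if pvF s shift i < m then pvF s shift i else m) m0
  inds.filter (fun i => pvF s shift i == m)

-- ===== PRECONDITION & SPEC =====
-- Pre_ excludes inputs where Python A raises IndexError (empty inds; any out-of-range index
-- among inds once len ≥ 2) and, additionally, singleton inds whose sole index is out of range:
-- there A returns that index untouched while B (which always reads s[inds[0]+shift]) raises.
def Pre_mins (s : String) (inds : List Int) (shift : Int) : Prop :=
  inds ≠ [] ∧ ∀ i ∈ inds, PySem.Raise.InRange s.toList.length (i + shift)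
instance (s : String) (inds : List Int) (shift : Int) : Decidable (Pre_mins s inds shift) := by unfold Pre_mins; infer_instance
def pvWitness_mins : String × List Int × Int := ("abcab", [0, 1, 3, 2], 0)
def Spec_mins (s : String) (inds : List Int) (shift : Int) (out : List Int) : Prop := out = mins_alt s inds shift
instance (s : String) (inds : List Int) (shift : Int) (out : List Int) : Decidable (Spec_mins s inds shift out) := by unfold Spec_mins; infer_instance

-- ===== CLAIM (what is proved, stated in full; the proofs are below) =====
def Claim_equal_mins : Prop := ∀ (s : String) (inds : List Int) (shift : Int), Dom_mins s inds shift → Pre_mins s inds shift → Spec_mins s inds shift (mins s inds shift)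

-- ===== LEMMAS AND PROOFS =====

-- A's loop, state characterised: starting from the tie-list of P (whose minimum is m),
-- folding A's step over ys yields the tie-list of P ++ ys for the updated running minimum.
theorem pv_loop_eq (f : Int → Char) :
    ∀ (ys P : List Int) (m : Char),
      (∃ i ∈ P, f i = m) → (∀ i ∈ P, ¬ f i < m) →
      ys.foldl (fun ret j => if f (ret.headD 0) > f j then [j]
                             else if f (ret.headD 0) = f j then ret ++ [j] else ret)
        (P.filter (fun i => f i == m))
      = (P ++ ys).filter
          (fun i => f i == ys.foldl (fun acc j => if f j < acc then f j else acc) m) := by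
  intro ys
  induction ys with
  | nil => intro P m _ _; simp
  | cons j ys ih =>
    intro P m hmem hmin
    obtain ⟨i0, hi0, hfi0⟩ := hmem
    have hne : P.filter (fun i => f i == m) ≠ [] := by
      intro h
      have := List.filter_eq_nil_iff.mp h i0 hi0
      simp [hfi0] at this
    have hhead : f ((P.filter (fun i => f i == m)).headD 0) = m := by
      cases hfe : P.filter (fun i => f i == m) with
      | nil => exact absurd hfe hne
      | cons y t =>
        have hy : y ∈ P.filter (fun i => f i == m) := by rw [hfe]; exact List.mem_cons_self ..
        have := (List.mem_filter.mp hy).2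
        simpa using this
    simp only [List.foldl_cons, hhead]
    rcases lt_trichotomy (f j) m with hlt | heq | hgt
    · have hstep : (if m > f j then [j]
          else if m = f j then P.filter (fun i => f i == m) ++ [j]
          else P.filter (fun i => f i == m)) = [j] := by
        simp [hlt]
      rw [hstep]
      have hPfilt : P.filter (fun i => f i == f j) = [] := by
        apply List.filter_eq_nil_iff.mpr
        intro a ha
        have := hmin a ha
        simp only [beq_iff_eq]
        intro h; exact this (h ▸ hlt)
      have hacc : ([j] : List Int) = (P ++ [j]).filter (fun i => f i == f j) := by
        simp [List.filter_append, hPfilt]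
      rw [hacc, ih (P ++ [j]) (f j) ⟨j, by simp, rfl⟩ ?_, if_pos hlt]
      · simp
      · intro a ha
        rcases List.mem_append.mp ha with h | h
        · have := hmin a h
          intro hc; exact this (lt_trans hc hlt)
        · simp at h; subst h; exact lt_irrefl _
    · have hstep : (if m > f j then [j]
          else if m = f j then P.filter (fun i => f i == m) ++ [j]
          else P.filter (fun i => f i == m)) = P.filter (fun i => f i == m) ++ [j] := by
        simp [heq]
      rw [hstep]
      have hacc : P.filter (fun i => f i == m) ++ [j]
          = (P ++ [j]).filter (fun i => f i == m) := by
        simp [List.filter_append, heq]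
      rw [hacc, ih (P ++ [j]) m ⟨i0, by simp [hi0], hfi0⟩ ?_, if_neg (by rw [heq]; exact lt_irrefl _)]
      · simp
      · intro a ha
        rcases List.mem_append.mp ha with h | h
        · exact hmin a h
        · simp at h; subst h; rw [heq]; exact lt_irrefl _
    · have hstep : (if m > f j then [j]
          else if m = f j then P.filter (fun i => f i == m) ++ [j]
          else P.filter (fun i => f i == m)) = P.filter (fun i => f i == m) := by
        have h1 : ¬ m > f j := not_lt.mpr (le_of_lt hgt)
        have h2 : m ≠ f j := ne_of_lt hgt
        simp [h1, h2]
      rw [hstep]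
      have hacc : P.filter (fun i => f i == m)
          = (P ++ [j]).filter (fun i => f i == m) := by
        simp [List.filter_append, (ne_of_gt hgt)]
      rw [hacc, ih (P ++ [j]) m ⟨i0, by simp [hi0], hfi0⟩ ?_, if_neg (not_lt.mpr (le_of_lt hgt))]
      · simp
      · intro a ha
        rcases List.mem_append.mp ha with h | h
        · exact hmin a h
        · simp at h; subst h; exact not_lt.mpr (le_of_lt hgt)

-- ===== VERDICT (by name: the statement is the Claim_ definition above) =====
theorem mins_spec : Claim_equal_mins := by
  intro s inds shift _ hpre
  obtain ⟨hne, _⟩ := hpre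
  obtain ⟨x, rest, rfl⟩ := List.exists_cons_of_ne_nil hne
  unfold Spec_mins mins mins_alt
  dsimp only
  have hbridge := PySem.List.foldl_pyRange_pyGetD' (x :: rest) 0
        (fun ret v =>
          if pvF s shift (ret.headD 0) > pvF s shift v then [v]
          else if pvF s shift (ret.headD 0) = pvF s shift v then ret ++ [v]
          else ret)
        [(PySem.List.pyGet? (x :: rest) 0).getD 0] (a := 1) (by norm_num)
  dsimp only at hbridge
  rw [hbridge]
  simp only [PySem.List.pyGet?_zero_cons, Option.getD_some, Int.toNat_one, List.drop_succ_cons,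
    List.drop_zero, List.foldl_cons]
  have hinit : ([x] : List Int) = [x].filter (fun i => pvF s shift i == pvF s shift x) := by simp
  rw [hinit, pv_loop_eq (pvF s shift) rest [x] (pvF s shift x) ⟨x, by simp, rfl⟩
        (by intro a ha; simp at ha; subst ha; exact lt_irrefl _)]
  simp
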